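-- pv_equiv track=rewrite | github.com/Infant83/FEATHER | src/federlicht/hub_publish.py | _srcset_urls
-- ===== SOURCE A (Python) =====
-- def _srcset_urls(text: str) -> list[str]:
--     refs: list[str] = []
--     for chunk in str(text or "").split(","):
--         token = chunk.strip()
--         if not token:
--             continue
--         url = token.split()[0].strip()
--         if url:
--             refs.append(url)
--     return refs
-- ===== SOURCE B (Python) =====
-- def _srcset_urls(text: str) -> list[str]:
--     s = str(text or "")
--     refs: list[str] = []
--     i, n = 0, len(s)
--     while True:
--         while i < n and s[i].isspace():        # skip leading whitespace of the segment
--             i += 1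
--         j = i
--         while j < n and not s[j].isspace() and s[j] != ',':   # scan the first token
--             j += 1
--         if j > i:
--             refs.append(s[i:j])
--         while j < n and s[j] != ',':           # skip the rest of the segment
--             j += 1
--         if j == n:
--             return refs
--         i = j + 1
-- ===== Notes on version B (the rewrite author's own statement) =====
-- stated objective: alternative
-- what changed: Replaces the comma-split/strip/whitespace-split pipeline with a single-pass two-pointer scanner that extracts each segment's first token in place, never materializing chunk lists or stripped copies.
import Mathlib
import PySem

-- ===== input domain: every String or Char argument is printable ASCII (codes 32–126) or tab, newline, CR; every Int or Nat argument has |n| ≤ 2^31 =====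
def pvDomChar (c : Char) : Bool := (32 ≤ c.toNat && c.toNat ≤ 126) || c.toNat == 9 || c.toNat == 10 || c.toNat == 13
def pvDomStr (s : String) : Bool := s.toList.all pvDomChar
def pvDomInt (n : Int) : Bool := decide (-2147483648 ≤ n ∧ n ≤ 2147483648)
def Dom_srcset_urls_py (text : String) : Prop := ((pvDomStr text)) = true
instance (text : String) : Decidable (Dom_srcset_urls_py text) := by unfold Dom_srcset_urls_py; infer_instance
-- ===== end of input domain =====

-- B replaces A's comma-split/strip/whitespace-split pipeline by a single-pass two-pointer scanner
-- over the string (alternative decomposition, same asymptotic cost).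


-- ===== PORT A =====
-- A on the code points; `str(text or "")` is the identity for a str argument.
-- `token.split()[0]` is ported as `.headD []`: `token` is non-empty there, so
-- `split₀ token` is non-empty and Python's IndexError branch is unreachable.
def srcset_urls_py (text : String) : List String :=
  (PySem.Chars.splitOn text.toList [',']).foldl
    (fun refs chunk =>
      let token := PySem.Chars.strip chunk
      if token.isEmpty then refs
      else
        let url := PySem.Chars.strip ((PySem.Chars.split₀ token).headD [])
        if url.isEmpty then refs else refs ++ [String.ofList url]) []

-- ===== PORT B =====
-- B is a single left-to-right scan; Python's index pair (i, j) into the immutable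
-- string corresponds to the remaining suffix here, and each inner `while` loop to
-- one dropWhile/takeWhile step over that suffix.
def altScan (s : List Char) (refs : List String) : List String :=
  let s1 := s.dropWhile PySem.Chars.isspace                                -- while i<n and s[i].isspace()
  let tok := s1.takeWhile (fun c => !PySem.Chars.isspace c && !(c == ',')) -- while j<n and not ws and != ','
  let refs' := if tok.isEmpty then refs else refs ++ [String.ofList tok]   -- if j > i: append s[i:j]
  let s2 := (s1.drop tok.length).dropWhile (fun c => !(c == ','))          -- while j<n and s[j] != ','
  if h : s2.isEmpty then refs'                                             -- j == n: return refs
  else altScan s2.tail refs'                                               -- i = j + 1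
termination_by s.length
decreasing_by
  have e1 := List.length_dropWhile_le PySem.Chars.isspace s
  have e2 := List.length_drop
    (l := s.dropWhile PySem.Chars.isspace)
    (i := ((s.dropWhile PySem.Chars.isspace).takeWhile
        (fun c => !PySem.Chars.isspace c && !(c == ','))).length)
  have e3 := List.length_dropWhile_le (fun c => !(c == ','))
      ((s.dropWhile PySem.Chars.isspace).drop
        ((s.dropWhile PySem.Chars.isspace).takeWhile
          (fun c => !PySem.Chars.isspace c && !(c == ','))).length)
  have e4 : ((((s.dropWhile PySem.Chars.isspace).drop
      ((s.dropWhile PySem.Chars.isspace).takeWhile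
        (fun c => !PySem.Chars.isspace c && !(c == ','))).length).dropWhile
        (fun c => !(c == ','))).isEmpty) = false := Bool.eq_false_iff.mpr h
  have e5 : 0 < (((s.dropWhile PySem.Chars.isspace).drop
      ((s.dropWhile PySem.Chars.isspace).takeWhile
        (fun c => !PySem.Chars.isspace c && !(c == ','))).length).dropWhile
        (fun c => !(c == ','))).length :=
    List.length_pos_iff.mpr (List.isEmpty_eq_false_iff.mp e4)
  simp only [List.length_tail]
  omega

def srcset_urls_py_alt (text : String) : List String :=
  altScan text.toList []

-- ===== PRECONDITION & SPEC =====
def Spec_srcset_urls_py (text : String) (out : List String) : Prop := out = srcset_urls_py_alt text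
instance (text : String) (out : List String) : Decidable (Spec_srcset_urls_py text out) := by unfold Spec_srcset_urls_py; infer_instance

-- ===== CLAIM (what is proved, stated in full; the proofs are below) =====
def Claim_equal_srcset_urls_py : Prop := ∀ (text : String), Dom_srcset_urls_py text → Spec_srcset_urls_py text (srcset_urls_py text)

-- ===== LEMMAS AND PROOFS =====

-- ideal comma split (proof-side reference)
def consHead (c : Char) : List (List Char) → List (List Char)
  | [] => [[c]]
  | x :: xs => (c :: x) :: xs

def splitC : List Char → List (List Char)
  | [] => [[]]
  | c :: cs => if c == ',' then [] :: splitC cs else consHead c (splitC cs)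

def preHead (pre : List Char) : List (List Char) → List (List Char)
  | [] => [pre]
  | x :: xs => (pre ++ x) :: xs

theorem splitC_ne_nil (cs : List Char) : splitC cs ≠ [] := by
  cases cs with
  | nil => simp [splitC]
  | cons c t =>
    simp only [splitC]
    split
    · simp
    · cases h : splitC t <;> simp [consHead]

theorem splitOn_go_eq (l : List Char) : ∀ (fuel : Nat) (cur : List Char)
    (acc : List (List Char)), l.length ≤ fuel →
    PySem.Chars.splitOn.go [','] fuel l cur acc = acc.reverse ++ preHead cur.reverse (splitC l) := by
  induction l with
  | nil =>
    intro fuel cur acc _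
    cases fuel <;> simp [PySem.Chars.splitOn.go, splitC, preHead]
  | cons c rest ih =>
    intro fuel cur acc hle
    cases fuel with
    | zero => simp at hle
    | succ f =>
      rw [PySem.Chars.splitOn.go]
      by_cases hc : c = ','
      · subst hc
        simp only [List.isPrefixOf, BEq.rfl, Bool.true_and, List.isPrefixOf_nil_left, if_pos,
          List.length_cons, List.length_nil, Nat.zero_add, List.drop_succ_cons, List.drop_zero]
        rw [ih f [] (List.reverse cur :: acc) (by simpa using hle)]
        cases h : splitC rest with
        | nil => exact absurd h (splitC_ne_nil rest)
        | cons x xs => simp [splitC, preHead, h]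
      · have hpf : [','].isPrefixOf (c :: rest) = false := by
          simp [List.isPrefixOf]
          exact fun h => absurd h.symm hc
        rw [hpf]
        simp only [Bool.false_eq_true, if_false]
        rw [ih f (c :: cur) acc (by simpa using Nat.le_of_succ_le_succ hle)]
        have hcs : splitC (c :: rest) = consHead c (splitC rest) := by
          simp [splitC, hc]
        rw [hcs]
        cases h : splitC rest with
        | nil => simp [preHead, consHead]
        | cons x xs => simp [preHead, consHead]

theorem splitOn_eq (cs : List Char) :
    PySem.Chars.splitOn cs [','] = splitC cs := by
  rw [PySem.Chars.splitOn, splitOn_go_eq cs (cs.length + 1) [] [] (by omega)]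
  cases h : splitC cs with
  | nil => exact absurd h (splitC_ne_nil cs)
  | cons x xs => simp [preHead]

-- ideal whitespace word accumulator (proof-side reference for split₀)
def wordsAux : List Char → List Char → List (List Char)
  | [], cur => if cur.isEmpty then [] else [cur.reverse]
  | c :: rest, cur =>
    if PySem.Chars.isspace c then
      (if cur.isEmpty then wordsAux rest [] else cur.reverse :: wordsAux rest [])
    else wordsAux rest (c :: cur)

theorem split0_go_eq (l : List Char) : ∀ (cur : List Char) (acc : List (List Char)),
    PySem.Chars.split₀.go l cur acc = acc.reverse ++ wordsAux l cur := by
  induction l with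
  | nil =>
    intro cur acc
    by_cases h : cur.isEmpty <;> simp [PySem.Chars.split₀.go, wordsAux, h]
  | cons c rest ih =>
    intro cur acc
    rw [PySem.Chars.split₀.go]
    by_cases hs : PySem.Chars.isspace c
    · by_cases h : cur.isEmpty <;> simp [hs, h, ih, wordsAux]
    · simp [hs, ih, wordsAux]

theorem wordsAux_head_of_ne (l : List Char) : ∀ (cur : List Char), cur ≠ [] →
    (wordsAux l cur).headD [] = cur.reverse ++ l.takeWhile (fun c => !PySem.Chars.isspace c) := by
  induction l with
  | nil => intro cur h; simp [wordsAux, h]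
  | cons c rest ih =>
    intro cur h
    by_cases hs : PySem.Chars.isspace c
    · simp [wordsAux, hs, h, List.takeWhile_cons]
    · rw [wordsAux]
      simp only [hs, Bool.false_eq_true, if_false]
      rw [ih (c :: cur) (by simp), List.takeWhile_cons_of_pos (by simp [hs])]
      simp

-- the first whitespace-word of a chunk
def firstWord (l : List Char) : List Char :=
  (l.dropWhile PySem.Chars.isspace).takeWhile (fun c => !PySem.Chars.isspace c)

theorem split0_head (l : List Char) :
    (PySem.Chars.split₀ l).headD [] = firstWord l := by
  rw [PySem.Chars.split₀, split0_go_eq]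
  simp only [List.reverse_nil, List.nil_append]
  induction l with
  | nil => simp [wordsAux, firstWord]
  | cons c rest ih =>
    by_cases hs : PySem.Chars.isspace c
    · simpa [wordsAux, hs, firstWord, List.dropWhile_cons_of_pos] using ih
    · rw [wordsAux]
      simp only [hs, Bool.false_eq_true, if_false]
      rw [wordsAux_head_of_ne rest [c] (by simp)]
      rw [firstWord, List.dropWhile_cons_of_neg (by simpa using hs),
          List.takeWhile_cons_of_pos (by simp [hs])]
      simp

-- rstrip unfolding on a cons
theorem rstrip_cons (c : Char) (t : List Char) :
    PySem.Chars.rstrip (c :: t) =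
      if PySem.Chars.isspace c && (PySem.Chars.rstrip t).isEmpty then []
      else c :: PySem.Chars.rstrip t := by
  simp only [PySem.Chars.rstrip, List.reverse_cons, List.dropWhile_append]
  by_cases h : (List.dropWhile PySem.Chars.isspace t.reverse).isEmpty
  · rw [if_pos h]
    have ht : List.dropWhile PySem.Chars.isspace t.reverse = [] := List.isEmpty_iff.mp h
    by_cases hs : PySem.Chars.isspace c <;>
      simp [List.dropWhile, hs, ht]
  · rw [if_neg h]
    have hne : List.dropWhile PySem.Chars.isspace t.reverse ≠ [] := by
      simpa [List.isEmpty_iff] using h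
    simp [List.isEmpty_iff, hne]

theorem takeWhile_rstrip (t : List Char) :
    (PySem.Chars.rstrip t).takeWhile (fun c => !PySem.Chars.isspace c)
      = t.takeWhile (fun c => !PySem.Chars.isspace c) := by
  induction t with
  | nil => simp [PySem.Chars.rstrip]
  | cons c rest ih =>
    rw [rstrip_cons]
    by_cases hs : PySem.Chars.isspace c
    · by_cases h : (PySem.Chars.rstrip rest).isEmpty <;>
        simp [hs, h, List.takeWhile_cons]
    · simp only [hs, Bool.false_and, Bool.false_eq_true, if_false]
      simp [List.takeWhile_cons, hs, ih]

theorem rstrip_eq_self (l : List Char) (h : ∀ x ∈ l, ¬ PySem.Chars.isspace x) :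
    PySem.Chars.rstrip l = l := by
  induction l with
  | nil => simp [PySem.Chars.rstrip]
  | cons c rest ih =>
    rw [rstrip_cons]
    simp [h c (by simp), ih (fun x hx => h x (by simp [hx]))]

theorem strip_firstWord (l : List Char) :
    PySem.Chars.strip (firstWord l) = firstWord l := by
  have hall : ∀ x ∈ firstWord l, ¬ PySem.Chars.isspace x := by
    intro x hx
    have := List.mem_takeWhile_imp hx
    simpa using this
  rw [PySem.Chars.strip, PySem.Chars.lstrip, List.dropWhile_eq_self_iff.mpr, rstrip_eq_self _ hall]
  intro hl
  exact hall _ (List.getElem_mem hl)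

-- A's per-chunk contribution, and its reduction to firstWord
def chunkOutA (ch : List Char) : List String :=
  let token := PySem.Chars.strip ch
  if token.isEmpty then []
  else
    let url := PySem.Chars.strip ((PySem.Chars.split₀ token).headD [])
    if url.isEmpty then [] else [String.ofList url]

theorem dropWhile_head_false {p : Char → Bool} {l : List Char} {c : Char} {t : List Char}
    (h : l.dropWhile p = c :: t) : p c = false := by
  induction l with
  | nil => simp at h
  | cons a r ih =>
    by_cases hp : p a
    · exact ih (by simpa [List.dropWhile_cons_of_pos hp] using h)
    · rw [List.dropWhile_cons_of_neg hp] at h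
      cases h
      simpa using hp

theorem chunkOutA_eq (ch : List Char) :
    chunkOutA ch = if (firstWord ch).isEmpty then [] else [String.ofList (firstWord ch)] := by
  unfold chunkOutA
  cases hd : ch.dropWhile PySem.Chars.isspace with
  | nil =>
    have h1 : PySem.Chars.strip ch = [] := by
      rw [PySem.Chars.strip, PySem.Chars.lstrip, hd]; simp [PySem.Chars.rstrip]
    simp [h1, firstWord, hd]
  | cons c t =>
    have hc : PySem.Chars.isspace c = false := dropWhile_head_false hd
    have h1 : PySem.Chars.strip ch = c :: PySem.Chars.rstrip t := by
      rw [PySem.Chars.strip, PySem.Chars.lstrip, hd, rstrip_cons]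
      simp [hc]
    have hfw : firstWord ch = c :: t.takeWhile (fun c => !PySem.Chars.isspace c) := by
      rw [firstWord, hd, List.takeWhile_cons_of_pos (by simp [hc])]
    have h2 : firstWord (c :: PySem.Chars.rstrip t) = firstWord ch := by
      rw [firstWord, List.dropWhile_cons_of_neg (by simp [hc]),
          List.takeWhile_cons_of_pos (by simp [hc]), takeWhile_rstrip, hfw]
    rw [h1]
    simp only [List.isEmpty_cons, Bool.false_eq_true, if_false]
    rw [split0_head, h2, strip_firstWord, hfw]

-- A as a flatMap over the ideal comma split
theorem portA_eq_flatMap (text : String) :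
    srcset_urls_py text = (splitC text.toList).flatMap chunkOutA := by
  rw [srcset_urls_py, splitOn_eq]
  have hb : (fun (refs : List String) (chunk : List Char) =>
      let token := PySem.Chars.strip chunk
      if token.isEmpty then refs
      else
        let url := PySem.Chars.strip ((PySem.Chars.split₀ token).headD [])
        if url.isEmpty then refs else refs ++ [String.ofList url])
      = fun refs chunk => refs ++ chunkOutA chunk := by
    funext refs chunk
    simp only [chunkOutA]
    split_ifs <;> simp
  rw [hb, PySem.List.foldl_append_eq_flatMap]
  simp

-- B's per-chunk contribution
def chunkOutB (ch : List Char) : List String :=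
  let t := (ch.dropWhile PySem.Chars.isspace).takeWhile
      (fun c => !PySem.Chars.isspace c && !(c == ','))
  if t.isEmpty then [] else [String.ofList t]

-- structure of splitC: first chunk and the remainder
theorem splitC_struct (cs : List Char) :
    splitC cs = cs.takeWhile (fun c => !(c == ',')) ::
      (match cs.dropWhile (fun c => !(c == ',')) with
        | [] => []
        | _ :: r => splitC r) := by
  induction cs with
  | nil => simp [splitC]
  | cons c t ih =>
    by_cases hc : c = ','
    · subst hc
      simp [splitC, List.takeWhile_cons, List.dropWhile_cons]
    · rw [splitC]
      simp only [beq_iff_eq, hc, if_false]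
      rw [List.takeWhile_cons_of_pos (by simp [hc]), List.dropWhile_cons_of_pos (by simp [hc]), ih]
      simp [consHead]

theorem isspace_ne_comma {c : Char} (h : PySem.Chars.isspace c = true) : (c == ',') = false := by
  by_cases hc : c = ','
  · subst hc
    simp [PySem.Chars.isspace] at h
  · simp [hc]

theorem takeWhile_congr_mem {p q : Char → Bool} (l : List Char)
    (h : ∀ a ∈ l, p a = q a) : l.takeWhile p = l.takeWhile q := by
  induction l with
  | nil => simp
  | cons a r ih =>
    rw [List.takeWhile_cons, List.takeWhile_cons, h a (by simp)]
    split
    · rw [ih (fun a ha => h a (by simp [ha]))]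
    · rfl

-- the token B scans equals the first token of the first comma-chunk
theorem first_tok_eq (cs : List Char) :
    ((cs.takeWhile (fun c => !(c == ','))).dropWhile PySem.Chars.isspace).takeWhile
        (fun c => !PySem.Chars.isspace c && !(c == ','))
      = (cs.dropWhile PySem.Chars.isspace).takeWhile
        (fun c => !PySem.Chars.isspace c && !(c == ',')) := by
  induction cs with
  | nil => simp
  | cons c t ih =>
    by_cases hc : c = ','
    · subst hc
      have hns : PySem.Chars.isspace ',' = false := by decide
      rw [List.takeWhile_cons_of_neg (by simp), List.dropWhile_cons_of_neg (by simp [hns])]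
      simp [List.takeWhile_cons]
    · by_cases hs : PySem.Chars.isspace c
      · rw [List.takeWhile_cons_of_pos (by simp [hc]),
            List.dropWhile_cons_of_pos (by simpa using hs),
            List.dropWhile_cons_of_pos (by simpa using hs), ih]
      · rw [List.takeWhile_cons_of_pos (by simp [hc]),
            List.dropWhile_cons_of_neg (by simpa using hs),
            List.dropWhile_cons_of_neg (by simpa using hs),
            List.takeWhile_cons_of_pos (by simp [hs, hc]),
            List.takeWhile_cons_of_pos (by simp [hs, hc]),
            List.takeWhile_takeWhile]
        congr 1
        apply takeWhile_congr_mem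
        intro a _
        by_cases ha : a = ',' <;> simp [ha]

-- skipping whitespace, then the token, then non-commas lands on the first comma of cs
theorem drop_takeWhile_len (l : List Char) (p : Char → Bool) :
    l.drop (l.takeWhile p).length = l.dropWhile p := by
  induction l with
  | nil => simp
  | cons a r ih =>
    by_cases hp : p a
    · rw [List.takeWhile_cons_of_pos hp, List.dropWhile_cons_of_pos hp]
      simpa using ih
    · rw [List.takeWhile_cons_of_neg (by simpa using hp),
          List.dropWhile_cons_of_neg (by simpa using hp)]
      simp

theorem drop_to_comma_eq (cs : List Char) :
    (((cs.dropWhile PySem.Chars.isspace).drop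
        ((cs.dropWhile PySem.Chars.isspace).takeWhile
          (fun c => !PySem.Chars.isspace c && !(c == ','))).length).dropWhile
        (fun c => !(c == ',')))
      = cs.dropWhile (fun c => !(c == ',')) := by
  rw [drop_takeWhile_len]
  have h2 : ∀ (l : List Char),
      ((l.dropWhile (fun c => !PySem.Chars.isspace c && !(c == ','))).dropWhile (fun c => !(c == ',')))
        = l.dropWhile (fun c => !(c == ',')) := by
    intro l
    induction l with
    | nil => simp
    | cons a r ih =>
      by_cases hq : (!PySem.Chars.isspace a && !(a == ',')) = true
      · rcases Bool.and_eq_true_iff.mp hq with ⟨hsa, hca⟩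
        simp [List.dropWhile_cons, hsa, hca, ih]
      · simp only [List.dropWhile_cons, hq, Bool.false_eq_true, if_false]
  have h3 : ∀ (l : List Char),
      ((l.dropWhile PySem.Chars.isspace).dropWhile (fun c => !(c == ',')))
        = l.dropWhile (fun c => !(c == ',')) := by
    intro l
    induction l with
    | nil => simp
    | cons a r ih =>
      by_cases hs : PySem.Chars.isspace a
      · rw [List.dropWhile_cons_of_pos hs,
            List.dropWhile_cons_of_pos (by simp [isspace_ne_comma hs]), ih]
      · rw [List.dropWhile_cons_of_neg (by simpa using hs)]
  rw [h2, h3]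

theorem altScan_eq_flatMap (n : Nat) : ∀ (cs : List Char), cs.length ≤ n → ∀ (refs : List String),
    altScan cs refs = refs ++ (splitC cs).flatMap chunkOutB := by
  induction n with
  | zero =>
    intro cs h refs
    cases cs with
    | cons a t => simp at h
    | nil =>
      rw [altScan]
      simp [splitC, chunkOutB]
  | succ n ih =>
    intro cs h refs
    rw [altScan]
    simp only [drop_to_comma_eq cs]
    rw [splitC_struct cs]
    cases hd : cs.dropWhile (fun c => !(c == ',')) with
    | nil =>
      simp only [List.isEmpty_nil, dite_true, List.flatMap_cons, List.flatMap_nil,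
        List.append_nil]
      rw [chunkOutB, first_tok_eq]
      split_ifs <;> simp
    | cons x rest =>
      have hlen : rest.length ≤ n := by
        have h1 := List.length_dropWhile_le (fun c => !(c == ',')) cs
        rw [hd] at h1
        simp at h1
        omega
      simp only [List.isEmpty_cons, List.tail_cons, dite_false, Bool.false_eq_true]
      rw [ih rest hlen]
      simp only [List.flatMap_cons]
      rw [chunkOutB, first_tok_eq]
      split_ifs <;> simp

-- chunks of splitC contain no comma, so A's first word is B's first token
theorem splitC_no_comma (cs : List Char) : ∀ ch ∈ splitC cs, ∀ c ∈ ch, c ≠ ',' := by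
  induction cs with
  | nil =>
    intro ch hch c hc
    simp [splitC] at hch
    subst hch
    simp at hc
  | cons a t ih =>
    intro ch hch c hc
    by_cases ha : a = ','
    · subst ha
      simp only [splitC, BEq.rfl, if_pos] at hch
      rcases List.mem_cons.mp hch with h | h
      · subst h; simp at hc
      · exact ih ch h c hc
    · rw [splitC] at hch
      simp only [beq_iff_eq, ha, if_false] at hch
      cases hsp : splitC t with
      | nil => exact absurd hsp (splitC_ne_nil t)
      | cons x xs =>
        rw [hsp] at hch
        simp only [consHead] at hch
        rcases List.mem_cons.mp hch with h | h
        · subst h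
          rcases List.mem_cons.mp hc with h' | h'
          · subst h'; exact ha
          · exact ih x (by rw [hsp]; simp) c h'
        · exact ih ch (by rw [hsp]; simp [h]) c hc

theorem chunkOut_eq (ch : List Char) (h : ∀ c ∈ ch, c ≠ ',') :
    chunkOutA ch = chunkOutB ch := by
  rw [chunkOutA_eq, chunkOutB]
  have ht : (ch.dropWhile PySem.Chars.isspace).takeWhile
        (fun c => !PySem.Chars.isspace c && !(c == ','))
      = firstWord ch := by
    rw [firstWord]
    apply takeWhile_congr_mem
    intro a ha
    have : a ∈ ch := (List.dropWhile_sublist _).mem ha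
    simp [h a this]
  rw [ht]

-- ===== VERDICT (by name: the statement is the Claim_ definition above) =====
theorem srcset_urls_py_spec : Claim_equal_srcset_urls_py := by
  intro text _
  unfold Spec_srcset_urls_py
  rw [portA_eq_flatMap, srcset_urls_py_alt,
      altScan_eq_flatMap text.toList.length text.toList (le_refl _) []]
  simp only [List.nil_append]
  exact List.flatMap_congr fun ch hch => chunkOut_eq ch (splitC_no_comma _ ch hch)
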